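-- pv_equiv track=rewrite | github.com/saladfist/Computerpraktikum | programs/functions_balltree.py | drop_clusters
-- ===== SOURCE A (Python) =====
-- def drop_clusters(B,h_dict,rho,epsilon): #drop B if it contains no h with h geq ρ + 2ε; B contains cube indices
--     remaining_clusters=[]
--     for cluster in B:
--         # For each cube in cluster, find max h-value among points in that cube
--         max_h = 0
--         for point_idx, h in h_dict.items():
--             if point_idx in cluster:
--                 max_h = max(max_h, h)
--         if max_h >= rho + epsilon:
--             remaining_clusters.append(cluster)
--     return remaining_clusters
-- ===== SOURCE B (Python) =====
-- def drop_clusters(B, h_dict, rho, epsilon):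
--     # Scan each cluster's own points with a dict lookup and stop at the first
--     # point whose h meets the threshold; if the threshold is <= 0 every cluster
--     # trivially passes (A's max_h starts at 0).
--     t = rho + epsilon
--     if t <= 0:
--         return list(B)
--     return [c for c in B if any(p in h_dict and h_dict[p] >= t for p in c)]
-- ===== Notes on version B (the rewrite author's own statement) =====
-- stated objective: faster
-- what changed: Instead of scanning the whole h_dict for every cluster, B scans each cluster's own points with an O(1) dict lookup and early-exits at the first point meeting the threshold; when rho+epsilon <= 0 it returns all clusters at once (A's max_h starts at 0).
import Mathlib
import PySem

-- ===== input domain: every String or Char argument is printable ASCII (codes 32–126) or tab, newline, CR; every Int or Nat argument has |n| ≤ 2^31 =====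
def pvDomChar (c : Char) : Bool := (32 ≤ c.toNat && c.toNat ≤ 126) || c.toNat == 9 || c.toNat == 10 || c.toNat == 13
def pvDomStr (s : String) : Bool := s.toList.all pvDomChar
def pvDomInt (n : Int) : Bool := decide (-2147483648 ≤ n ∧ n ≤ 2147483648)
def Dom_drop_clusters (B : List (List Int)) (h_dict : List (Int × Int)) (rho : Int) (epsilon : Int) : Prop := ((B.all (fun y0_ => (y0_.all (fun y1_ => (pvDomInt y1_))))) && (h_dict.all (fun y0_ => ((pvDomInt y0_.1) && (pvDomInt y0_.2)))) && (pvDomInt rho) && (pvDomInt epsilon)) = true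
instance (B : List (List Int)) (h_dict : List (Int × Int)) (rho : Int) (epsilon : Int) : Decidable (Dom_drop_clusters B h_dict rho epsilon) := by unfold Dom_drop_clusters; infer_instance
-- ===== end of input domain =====

-- B scans each cluster's own points with a first-match dict lookup and early-exits at the
-- first point meeting the threshold (and returns all clusters at once when rho+epsilon ≤ 0),
-- instead of A's scan of the whole h_dict per cluster: faster.

-- ===== PORT A =====
def drop_clusters (B : List (List Int)) (h_dict : List (Int × Int)) (rho : Int) (epsilon : Int) : List (List Int) :=
  B.foldl (fun remaining_clusters cluster =>
    let max_h := h_dict.foldl (fun max_h kh =>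
      if kh.1 ∈ cluster then max max_h kh.2 else max_h) 0
    if max_h ≥ rho + epsilon then remaining_clusters ++ [cluster] else remaining_clusters) []

-- ===== PORT B =====
def drop_clusters_alt (B : List (List Int)) (h_dict : List (Int × Int)) (rho : Int) (epsilon : Int) : List (List Int) :=
  let t := rho + epsilon
  if t ≤ 0 then B
  else B.filter (fun c => c.any (fun p =>
    match h_dict.find? (fun kh => kh.1 == p) with   -- 'p in h_dict and h_dict[p] >= t': first-match lookup
    | some kh => kh.2 ≥ t
    | none => false))

-- ===== PRECONDITION & SPEC =====
-- Pre_ excludes association lists with duplicate keys: a Python dict cannot hold them, so the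
-- Lean assoc-list corner (A's port folds over every pair, B's looks up the first match) is an
-- artefact of the encoding.
def Pre_drop_clusters (B : List (List Int)) (h_dict : List (Int × Int)) (rho : Int) (epsilon : Int) : Prop :=
  (h_dict.map Prod.fst).Nodup
instance (B : List (List Int)) (h_dict : List (Int × Int)) (rho : Int) (epsilon : Int) : Decidable (Pre_drop_clusters B h_dict rho epsilon) := by unfold Pre_drop_clusters; infer_instance
def pvWitness_drop_clusters : List (List Int) × (List (Int × Int)) × Int × Int :=
  ([[1, 2], [3]], [(1, 5), (3, 0)], 2, 1)

def Spec_drop_clusters (B : List (List Int)) (h_dict : List (Int × Int)) (rho : Int) (epsilon : Int) (out : List (List Int)) : Prop := out = drop_clusters_alt B h_dict rho epsilon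
instance (B : List (List Int)) (h_dict : List (Int × Int)) (rho : Int) (epsilon : Int) (out : List (List Int)) : Decidable (Spec_drop_clusters B h_dict rho epsilon out) := by unfold Spec_drop_clusters; infer_instance

-- ===== CLAIM (what is proved, stated in full; the proofs are below) =====
def Claim_equal_drop_clusters : Prop := ∀ (B : List (List Int)) (h_dict : List (Int × Int)) (rho : Int) (epsilon : Int), Dom_drop_clusters B h_dict rho epsilon → Pre_drop_clusters B h_dict rho epsilon → Spec_drop_clusters B h_dict rho epsilon (drop_clusters B h_dict rho epsilon)

-- ===== LEMMAS AND PROOFS =====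

-- A's inner fold meets the threshold iff the threshold is ≤ 0 or some pair's key lies in the cluster with value ≥ t.
theorem maxfold_ge_iff (d : List (Int × Int)) (c : List Int) (t a : Int) :
    t ≤ d.foldl (fun m kh => if kh.1 ∈ c then max m kh.2 else m) a ↔
      t ≤ a ∨ ∃ kh ∈ d, kh.1 ∈ c ∧ t ≤ kh.2 := by
  induction d generalizing a with
  | nil => simp
  | cons kh d ih =>
    simp only [List.foldl_cons, List.mem_cons]
    rw [ih]
    by_cases h : kh.1 ∈ c
    · simp only [if_pos h]
      constructor
      · rintro (hm | hk)
        · rcases le_max_iff.mp hm with h1 | h2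
          · exact Or.inl h1
          · exact Or.inr ⟨kh, Or.inl rfl, h, h2⟩
        · exact Or.inr ⟨hk.choose, Or.inr hk.choose_spec.1, hk.choose_spec.2⟩
      · rintro (ha | ⟨kh', hmem, hc, ht⟩)
        · exact Or.inl (le_max_iff.mpr (Or.inl ha))
        · rcases hmem with rfl | hmem
          · exact Or.inl (le_max_iff.mpr (Or.inr ht))
          · exact Or.inr ⟨kh', hmem, hc, ht⟩
    · simp only [if_neg h]
      constructor
      · rintro (ha | ⟨kh', hmem, hc, ht⟩)
        · exact Or.inl ha
        · exact Or.inr ⟨kh', Or.inr hmem, hc, ht⟩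
      · rintro (ha | ⟨kh', hmem, hc, ht⟩)
        · exact Or.inl ha
        · rcases hmem with rfl | hmem
          · exact absurd hc h
          · exact Or.inr ⟨kh', hmem, hc, ht⟩

-- Under nodup keys, the pair a key's lookup finds is the unique pair with that key.
theorem find?_of_mem_nodup (d : List (Int × Int)) (hnd : (d.map Prod.fst).Nodup)
    (kh : Int × Int) (hmem : kh ∈ d) : d.find? (fun kh' => kh'.1 == kh.1) = some kh := by
  induction d with
  | nil => simp at hmem
  | cons x d ih =>
    simp only [List.map_cons, List.nodup_cons] at hnd
    rcases List.mem_cons.mp hmem with rfl | hmem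
    · simp
    · have hne : ¬ (x.1 == kh.1) = true := by
        simp only [beq_iff_eq]
        intro h
        exact hnd.1 (h ▸ List.mem_map_of_mem hmem)
      rw [List.find?_cons_of_neg (by simpa using hne)]
      exact ih hnd.2 hmem

-- B's per-cluster test, under nodup keys, matches A's existential.
theorem any_lookup_iff (d : List (Int × Int)) (hnd : (d.map Prod.fst).Nodup)
    (c : List Int) (t : Int) :
    (c.any (fun p => match d.find? (fun kh => kh.1 == p) with
      | some kh => decide (t ≤ kh.2)
      | none => false)) = true ↔ ∃ kh ∈ d, kh.1 ∈ c ∧ t ≤ kh.2 := by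
  rw [List.any_eq_true]
  constructor
  · rintro ⟨p, hp, hm⟩
    cases hfind : d.find? (fun kh => kh.1 == p) with
    | none => rw [hfind] at hm; simp at hm
    | some kh =>
      rw [hfind] at hm
      have hkey : (kh.1 == p) = true := by
        have := List.find?_some (p := fun kh : Int × Int => kh.1 == p) hfind
        simpa using this
      have hmem : kh ∈ d := List.mem_of_find?_eq_some hfind
      exact ⟨kh, hmem, (beq_iff_eq.mp hkey) ▸ hp, by simpa using hm⟩
  · rintro ⟨kh, hmem, hc, ht⟩
    refine ⟨kh.1, hc, ?_⟩
    rw [find?_of_mem_nodup d hnd kh hmem]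
    simpa using ht

-- ===== VERDICT (by name: the statement is the Claim_ definition above) =====
theorem drop_clusters_spec : Claim_equal_drop_clusters := by
  intro B h_dict rho epsilon _hDom hPre
  unfold Spec_drop_clusters drop_clusters drop_clusters_alt
  rw [PySem.List.foldl_append_ite_eq_filter
    (p := fun cluster => (rho + epsilon) ≤ h_dict.foldl
      (fun m kh => if kh.1 ∈ cluster then max m kh.2 else m) 0)]
  simp only [List.nil_append]
  by_cases ht : rho + epsilon ≤ 0
  · rw [if_pos ht]
    apply List.filter_eq_self.mpr
    intro c _
    exact decide_eq_true ((maxfold_ge_iff h_dict c _ 0).mpr (Or.inl ht))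
  · rw [if_neg ht]
    refine List.filter_congr fun c _ => ?_
    rw [Bool.eq_iff_iff, decide_eq_true_eq, maxfold_ge_iff h_dict c (rho + epsilon) 0,
      any_lookup_iff h_dict hPre c (rho + epsilon)]
    constructor
    · rintro (h0 | hex)
      · exact absurd h0 ht
      · exact hex
    · exact Or.inr
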